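-- pv_equiv track=rewrite | github.com/InderdeepSync/algoexpert_problems | main.py | single_cycle_check
-- ===== SOURCE A (Python) =====
-- def single_cycle_check(arr):
--     assert len(arr)
--
--     seen = []
--     current_index = 0
--
--     while current_index not in seen:
--         seen.append(current_index)
--
--         current_index = (current_index + arr[current_index]) % len(arr)
--
--     return len(seen) == len(arr) and current_index == seen[0]
-- ===== SOURCE B (Python) =====
-- def single_cycle_check(arr):
--     n = len(arr)
--     assert n
--     idx = 0
--     for i in range(n):
--         if i > 0 and idx == 0:
--             return False
--         idx = (idx + arr[idx]) % n
--     return idx == 0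
-- ===== Notes on version B (the rewrite author's own statement) =====
-- stated objective: faster
-- what changed: B drops A's visited-list with its O(n) membership scan per step and instead makes exactly n jumps in one pass, returning False on a premature return to index 0 and checking the index is back at 0 after the n-th jump
import Mathlib
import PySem

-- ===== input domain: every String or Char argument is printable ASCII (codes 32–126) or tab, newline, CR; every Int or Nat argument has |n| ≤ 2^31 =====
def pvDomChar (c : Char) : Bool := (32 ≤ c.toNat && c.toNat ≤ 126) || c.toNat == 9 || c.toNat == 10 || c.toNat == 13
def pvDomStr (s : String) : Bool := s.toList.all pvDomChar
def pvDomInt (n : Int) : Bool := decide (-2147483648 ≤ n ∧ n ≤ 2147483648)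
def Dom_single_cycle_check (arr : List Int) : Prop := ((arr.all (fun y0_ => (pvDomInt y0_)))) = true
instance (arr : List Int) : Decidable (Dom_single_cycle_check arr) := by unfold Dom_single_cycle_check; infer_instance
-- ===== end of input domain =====

-- B replaces A's visited-list (O(n) membership scan per jump) by a single pass of exactly n
-- jumps with an early exit on a premature return to index 0: asymptotically faster, O(n) vs O(n^2).

-- ===== PORT A =====
-- A's while loop, ported with fuel arr.length + 1; the loop appends a fresh index each
-- iteration and indices are distinct values of range(len(arr)), so the fuel never runs out
-- (proved below via the first-repeat characterisation).  Inside Pre_ (arr ≠ []) the index is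
-- always in range, so `(pyGet? …).getD 0` is exactly Python's arr[current_index].
def pvALoop (arr : List Int) : Nat → List Int → Int → List Int × Int
  | 0, seen, cur => (seen, cur)
  | fuel+1, seen, cur =>
    if cur ∈ seen then (seen, cur)
    else pvALoop arr fuel (seen ++ [cur])
      (PySem.Int.mod (cur + (PySem.List.pyGet? arr cur).getD 0) arr.length)

def single_cycle_check (arr : List Int) : Bool :=
  let r := pvALoop arr (arr.length + 1) [] 0
  decide (r.1.length = arr.length) && decide (r.2 = r.1.headD 0)

-- ===== PORT B =====
def pvBLoop (arr : List Int) : Nat → Nat → Int → Bool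
  | 0, _, idx => decide (idx = 0)
  | k+1, i, idx =>
    if 0 < i ∧ idx = 0 then false
    else pvBLoop arr k (i+1)
      (PySem.Int.mod (idx + (PySem.List.pyGet? arr idx).getD 0) arr.length)

def single_cycle_check_alt (arr : List Int) : Bool := pvBLoop arr arr.length 0 0

-- ===== PRECONDITION & SPEC =====
-- A asserts len(arr): the empty list raises AssertionError, so it is excluded.
def Pre_single_cycle_check (arr : List Int) : Prop := arr ≠ []
instance (arr : List Int) : Decidable (Pre_single_cycle_check arr) := by
  unfold Pre_single_cycle_check; infer_instance

def pvWitness_single_cycle_check : List Int := [2, 3, 1, -4, -7]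

def Spec_single_cycle_check (arr : List Int) (out : Bool) : Prop := out = single_cycle_check_alt arr
instance (arr : List Int) (out : Bool) : Decidable (Spec_single_cycle_check arr out) := by unfold Spec_single_cycle_check; infer_instance

-- ===== CLAIM (what is proved, stated in full; the proofs are below) =====
def Claim_equal_single_cycle_check : Prop := ∀ (arr : List Int), Dom_single_cycle_check arr → Pre_single_cycle_check arr → Spec_single_cycle_check arr (single_cycle_check arr)

-- ===== LEMMAS AND PROOFS =====

-- One jump of either program, and its k-fold iterate from index 0.
def pvStp (arr : List Int) (c : Int) : Int :=
  PySem.Int.mod (c + (PySem.List.pyGet? arr c).getD 0) arr.length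

def pvItr (arr : List Int) (k : Nat) : Int := (pvStp arr)^[k] 0

theorem pvItr_succ (arr : List Int) (k : Nat) :
    pvItr arr (k+1) = pvStp arr (pvItr arr k) := by
  simp [pvItr, Function.iterate_succ_apply']

theorem pvStp_bounds (arr : List Int) (h : arr ≠ []) (c : Int) :
    0 ≤ pvStp arr c ∧ pvStp arr c < (arr.length : Int) := by
  have hn : 0 < (arr.length : Int) := by
    have := List.length_pos_of_ne_nil h; exact_mod_cast this
  exact ⟨PySem.Int.mod_nonneg _ hn, PySem.Int.mod_lt _ hn⟩

theorem pvItr_bounds (arr : List Int) (h : arr ≠ []) (k : Nat) :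
    0 ≤ pvItr arr k ∧ pvItr arr k < (arr.length : Int) := by
  cases k with
  | zero =>
    have hn : 0 < (arr.length : Int) := by
      have := List.length_pos_of_ne_nil h; exact_mod_cast this
    exact ⟨le_refl 0, hn⟩
  | succ m => rw [pvItr_succ]; exact pvStp_bounds arr h _

theorem pvItr_det (arr : List Int) (a m : Nat) :
    pvItr arr (a + m) = (pvStp arr)^[m] (pvItr arr a) := by
  simp [pvItr, Nat.add_comm a m, Function.iterate_add_apply]

-- pigeonhole: among pvItr 0 .. pvItr n there is a repeat
theorem pvRepeat_exists (arr : List Int) (h : arr ≠ []) :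
    ∃ k, k ≤ arr.length ∧ ∃ j < k, pvItr arr k = pvItr arr j := by
  have hmaps : ∀ a ∈ Finset.range (arr.length + 1),
      (pvItr arr a).toNat ∈ Finset.range arr.length := by
    intro a _
    have := pvItr_bounds arr h a
    simp only [Finset.mem_range]
    omega
  have hcard : (Finset.range arr.length).card < (Finset.range (arr.length + 1)).card := by
    simp
  obtain ⟨a, ha, b, hb, hne, heq⟩ :=
    Finset.exists_ne_map_eq_of_card_lt_of_maps_to hcard hmaps
  have hia := pvItr_bounds arr h a
  have hib := pvItr_bounds arr h b
  have heq' : pvItr arr a = pvItr arr b := by omega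
  rcases Nat.lt_or_ge a b with hab | hab
  · exact ⟨b, by simpa using Nat.lt_succ_iff.mp (Finset.mem_range.mp hb),
      a, hab, heq'.symm⟩
  · have : b < a := lt_of_le_of_ne hab (fun e => hne e.symm)
    exact ⟨a, by simpa using Nat.lt_succ_iff.mp (Finset.mem_range.mp ha), b, this, heq'⟩

-- A's loop, run from the state after i iterations, halts at the first repeat K.
theorem pvALoop_eq (arr : List Int) (K : Nat)
    (hK : ∃ j < K, pvItr arr K = pvItr arr j)
    (hmin : ∀ k < K, ¬ ∃ j < k, pvItr arr k = pvItr arr j) :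
    ∀ fuel i, i ≤ K → K - i < fuel →
      pvALoop arr fuel ((List.range i).map (pvItr arr)) (pvItr arr i)
        = ((List.range K).map (pvItr arr), pvItr arr K) := by
  intro fuel
  induction fuel with
  | zero => intro i _ hf; omega
  | succ f ih =>
    intro i hi hf
    rcases Nat.lt_or_ge i K with hiK | hiK
    · have hnotmem : pvItr arr i ∉ (List.range i).map (pvItr arr) := by
        intro hmem
        obtain ⟨j, hj, hje⟩ := by simpa using hmem
        exact hmin i hiK ⟨j, hj, hje.symm⟩
      rw [pvALoop, if_neg hnotmem]
      have hstep : PySem.Int.mod (pvItr arr i + (PySem.List.pyGet? arr (pvItr arr i)).getD 0)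
          (arr.length : Int) = pvItr arr (i+1) := by
        rw [pvItr_succ]; rfl
      rw [hstep]
      have hseen : (List.range i).map (pvItr arr) ++ [pvItr arr i]
          = (List.range (i+1)).map (pvItr arr) := by
        rw [List.range_succ, List.map_append]; rfl
      rw [hseen]
      exact ih (i+1) hiK (by omega)
    · have hiK' : i = K := le_antisymm hi hiK
      subst hiK'
      have hmem : pvItr arr i ∈ (List.range i).map (pvItr arr) := by
        obtain ⟨j, hj, hje⟩ := hK
        simp only [List.mem_map, List.mem_range]
        exact ⟨j, hj, hje.symm⟩
      rw [pvALoop, if_pos hmem]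

theorem pvA_char (arr : List Int) (K : Nat) (hK1 : 1 ≤ K)
    (hKn : K ≤ arr.length)
    (hK : ∃ j < K, pvItr arr K = pvItr arr j)
    (hmin : ∀ k < K, ¬ ∃ j < k, pvItr arr k = pvItr arr j) :
    single_cycle_check arr = (decide (K = arr.length) && decide (pvItr arr K = 0)) := by
  have h0 : pvALoop arr (arr.length + 1) ((List.range 0).map (pvItr arr)) (pvItr arr 0)
      = ((List.range K).map (pvItr arr), pvItr arr K) :=
    pvALoop_eq arr K hK hmin (arr.length + 1) 0 (by omega) (by omega)
  have h00 : pvItr arr 0 = 0 := rfl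
  simp only [List.range_zero, List.map_nil, h00] at h0
  unfold single_cycle_check
  rw [h0]
  have hhead : ((List.range K).map (pvItr arr)).headD 0 = 0 := by
    obtain ⟨K', rfl⟩ := Nat.exists_eq_add_of_le hK1
    rw [Nat.add_comm, List.range_succ_eq_map]
    simp [h00]
  simp only [List.length_map, List.length_range, hhead]

-- B's loop from iteration i ≥ 1 onward: true iff the walk is at 0 after all n jumps
-- and never at 0 at an intermediate iteration.
theorem pvBLoop_eq (arr : List Int) :
    ∀ k i, 1 ≤ i →
      pvBLoop arr k i (pvItr arr i)
        = (decide (pvItr arr (i+k) = 0)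
            && decide (∀ j, j < i + k → i ≤ j → pvItr arr j ≠ 0)) := by
  intro k
  induction k with
  | zero =>
    intro i hi
    simp [pvBLoop]
    omega
  | succ f ih =>
    intro i hi
    by_cases hz : pvItr arr i = 0
    · rw [pvBLoop, if_pos ⟨hi, hz⟩]
      have : ¬ (∀ j, j < i + (f+1) → i ≤ j → pvItr arr j ≠ 0) := by
        intro hall; exact hall i (by omega) (le_refl i) hz
      simp [this]
    · rw [pvBLoop, if_neg (by tauto)]
      have hstep : PySem.Int.mod (pvItr arr i + (PySem.List.pyGet? arr (pvItr arr i)).getD 0)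
          (arr.length : Int) = pvItr arr (i+1) := by
        rw [pvItr_succ]; rfl
      rw [hstep, ih (i+1) (by omega)]
      have h1 : i + 1 + f = i + (f + 1) := by omega
      rw [h1]
      have h2 : (∀ j, j < i + (f+1) → i + 1 ≤ j → pvItr arr j ≠ 0)
          ↔ (∀ j, j < i + (f+1) → i ≤ j → pvItr arr j ≠ 0) := by
        constructor
        · intro hall j hj2 hj1
          rcases Nat.eq_or_lt_of_le hj1 with rfl | hlt
          · exact hz
          · exact hall j hj2 hlt
        · intro hall j hj2 hj1; exact hall j hj2 (by omega)
      rw [decide_eq_decide.mpr h2]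

theorem pvB_char (arr : List Int) (h : arr ≠ []) :
    single_cycle_check_alt arr
      = (decide (pvItr arr arr.length = 0)
          && decide (∀ j, j < arr.length → 1 ≤ j → pvItr arr j ≠ 0)) := by
  obtain ⟨m, hm⟩ : ∃ m, arr.length = m + 1 := by
    have := List.length_pos_of_ne_nil h; exact ⟨arr.length - 1, by omega⟩
  unfold single_cycle_check_alt
  rw [hm, pvBLoop, if_neg (by simp)]
  have hstep : PySem.Int.mod ((0:Int) + (PySem.List.pyGet? arr 0).getD 0)
      (arr.length : Int) = pvItr arr 1 := by
    rw [show (1:Nat) = 0 + 1 from rfl, pvItr_succ]; rfl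
  rw [hstep, pvBLoop_eq arr m 1 (le_refl 1), Nat.add_comm 1 m]

-- ===== VERDICT (by name: the statement is the Claim_ definition above) =====
theorem single_cycle_check_spec : Claim_equal_single_cycle_check := by
  intro arr _ hpre
  unfold Spec_single_cycle_check
  obtain ⟨K0, hK0n, hK0⟩ := pvRepeat_exists arr hpre
  have hex : ∃ k, ∃ j < k, pvItr arr k = pvItr arr j := ⟨K0, hK0⟩
  set K := Nat.find hex with hKdef
  have hK : ∃ j < K, pvItr arr K = pvItr arr j := Nat.find_spec hex
  have hmin : ∀ k < K, ¬ ∃ j < k, pvItr arr k = pvItr arr j := fun k hk =>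
    Nat.find_min hex hk
  have hKn : K ≤ arr.length := le_trans (Nat.find_le hK0) hK0n
  have hK1 : 1 ≤ K := by
    by_contra hc
    have hK0' : K = 0 := by omega
    obtain ⟨j, hj, _⟩ := hK
    omega
  rw [pvA_char arr K hK1 hKn hK hmin, pvB_char arr hpre]
  rw [← Bool.decide_and, ← Bool.decide_and, decide_eq_decide]
  constructor
  · rintro ⟨hKe, hz⟩
    refine ⟨hKe ▸ hz, fun j hj2 hj1 hjz => ?_⟩
    exact hmin j (by omega) ⟨0, by omega, by simpa [pvItr] using hjz⟩
  · rintro ⟨hn0, hno⟩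
    have hKeq : K = arr.length := by
      by_contra hne
      have hKlt : K < arr.length := lt_of_le_of_ne hKn hne
      obtain ⟨j, hj, hje⟩ := hK
      have hdet : pvItr arr (j + (arr.length - K)) = pvItr arr arr.length := by
        rw [pvItr_det, ← hje, ← pvItr_det]
        congr 1
        omega
      have ht1 : 1 ≤ j + (arr.length - K) := by omega
      have ht2 : j + (arr.length - K) < arr.length := by omega
      exact hno _ ht2 ht1 (hdet.trans hn0)
    exact ⟨hKeq, by rw [hKeq]; exact hn0⟩
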